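-- pv_equiv track=rewrite | github.com/askft/thesis-code | scripts/metrics.py | sentence_metrics
-- ===== SOURCE A (Python) =====
-- from collections import defaultdict, Counter
-- from typing import DefaultDict, List, Counter as CounterT
--
-- def  get_indices(labels):
--     indices = list()
--     start = 0
--     counter = 0
--     in_entity = False
--
--     for label in labels:
--         counter += 1
--
--         if in_entity:
--             if label == "O":
--                 indices.append((start, counter - 1))
--                 in_entity = False
--
--             elif label == "B":
--                 indices.append((start, start))
--                 start = counter
--
--         elif label == "B":
--             start = counter
--             in_entity = True
--
--     return indices
--
-- def sentence_metrics(pred_labels: List[str], gs_labels: List[str]):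
--
--     # Treating B = I
--     confusion_matrix = defaultdict(int)
--     for pred, gs in zip(pred_labels, gs_labels):
--
--         if pred == "B" or pred == "I":
--             if gs == "B" or gs == "I":
--                 confusion_matrix["true_positive"] += 1
--             elif gs == "O":
--                 confusion_matrix["false_positive"] += 1
--         elif pred == "O":
--             if gs == "O":
--                 confusion_matrix["true_negative"] += 1
--             elif gs == "B" or gs == "I":
--                 confusion_matrix["false_negative"] += 1
--
--     # Treating B=/=I
--     token_matrix = defaultdict(lambda: defaultdict(int))
--
--     for pred, gs in zip(pred_labels, gs_labels):
--         token_matrix[gs][pred] += 1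
--
--     # Entity Level Perfect. Naive way of taking the metrics
--     entity_matrix = defaultdict(int)
--     pred_indices = get_indices(pred_labels)
--     gs_indices = get_indices(gs_labels)
--
--     while pred_indices and gs_indices:
--         pred = pred_indices.pop(0)
--         gs = gs_indices.pop(0)
--
--         pred_set = set(range(pred[0], pred[1] + 1 ))
--         gs_set = set(range(gs[0], gs[1] + 1 ))
--
--         if pred_set & gs_set:
--             if not pred_set.difference(gs_set):
--                 entity_matrix["true_positive"] += 1
--
--             # there is some overlap so the entity has been mispredicted
--             # there are no strict rules for this, but it should make some sense
--             elif not pred[0] in gs_set or not pred[1] in gs_set: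
--                 entity_matrix["false_positive"] += 1
--
--             else:
--                 entity_matrix["false_negative"] += 1
--
--         # one tuple will have to be returned to its list
--         else:
--             if pred[0] > gs[0]:
--                 entity_matrix["false_negative"] += 1
--                 pred_indices.insert(0, pred)
--
--             else:
--                 entity_matrix["false_positive"] += 1
--                 gs_indices.insert(0, gs)
--
--     entity_matrix["false_positive"] += len(pred_indices)
--     entity_matrix["false_negative"] += len(gs_indices)
--     entity_matrix["true_negative"] = confusion_matrix["true_negative"]
--
--     return confusion_matrix, token_matrix, entity_matrix
-- ===== SOURCE B (Python) =====
-- from collections import defaultdict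
--
--
-- def get_indices(labels):
--     # same linear span extraction A uses (already O(n)); the restructuring is elsewhere
--     indices = list()
--     start = 0
--     counter = 0
--     in_entity = False
--     for label in labels:
--         counter += 1
--         if in_entity:
--             if label == "O":
--                 indices.append((start, counter - 1))
--                 in_entity = False
--             elif label == "B":
--                 indices.append((start, start))
--                 start = counter
--         elif label == "B":
--             start = counter
--             in_entity = True
--     return indices
--
--
-- def sentence_metrics(pred_labels, gs_labels):
--     # Single fused pass for both token-level matrices.
--     confusion_matrix = defaultdict(int)
--     token_matrix = defaultdict(lambda: defaultdict(int))
--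
--     for pred, gs in zip(pred_labels, gs_labels):
--         pred_ent = pred == "B" or pred == "I"
--         gs_ent = gs == "B" or gs == "I"
--         if pred_ent:
--             if gs_ent:
--                 confusion_matrix["true_positive"] += 1
--             elif gs == "O":
--                 confusion_matrix["false_positive"] += 1
--         elif pred == "O":
--             if gs == "O":
--                 confusion_matrix["true_negative"] += 1
--             elif gs_ent:
--                 confusion_matrix["false_negative"] += 1
--         token_matrix[gs][pred] += 1
--
--     # Entity level: two-pointer merge over the span lists with O(1)
--     # interval arithmetic (no pop(0)/insert(0), no materialised sets).
--     entity_matrix = defaultdict(int)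
--     pred_indices = get_indices(pred_labels)
--     gs_indices = get_indices(gs_labels)
--     i, j = 0, 0
--     n, m = len(pred_indices), len(gs_indices)
--
--     while i < n and j < m:
--         p1, p2 = pred_indices[i]
--         g1, g2 = gs_indices[j]
--         if max(p1, g1) <= min(p2, g2):          # intervals overlap
--             if g1 <= p1 and p2 <= g2:           # pred contained in gs
--                 entity_matrix["true_positive"] += 1
--             else:
--                 entity_matrix["false_positive"] += 1
--             i += 1
--             j += 1
--         elif p1 > g1:                           # gs span strictly before pred
--             entity_matrix["false_negative"] += 1
--             j += 1
--         else:                                   # pred span strictly before gs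
--             entity_matrix["false_positive"] += 1
--             i += 1
--
--     entity_matrix["false_positive"] += n - i
--     entity_matrix["false_negative"] += m - j
--     entity_matrix["true_negative"] = confusion_matrix["true_negative"]
--
--     return confusion_matrix, token_matrix, entity_matrix
-- ===== Notes on version B (the rewrite author's own statement) =====
-- stated objective: alternative
-- what changed: B fuses A's two token-level passes over the zipped labels into one pass, and replaces A's entity-matching loop (pop(0)/insert(0) on lists plus materialised set(range(...)) intersection/difference per pair) with a two-pointer merge over the span lists using O(1) interval arithmetic.
import Mathlib
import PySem

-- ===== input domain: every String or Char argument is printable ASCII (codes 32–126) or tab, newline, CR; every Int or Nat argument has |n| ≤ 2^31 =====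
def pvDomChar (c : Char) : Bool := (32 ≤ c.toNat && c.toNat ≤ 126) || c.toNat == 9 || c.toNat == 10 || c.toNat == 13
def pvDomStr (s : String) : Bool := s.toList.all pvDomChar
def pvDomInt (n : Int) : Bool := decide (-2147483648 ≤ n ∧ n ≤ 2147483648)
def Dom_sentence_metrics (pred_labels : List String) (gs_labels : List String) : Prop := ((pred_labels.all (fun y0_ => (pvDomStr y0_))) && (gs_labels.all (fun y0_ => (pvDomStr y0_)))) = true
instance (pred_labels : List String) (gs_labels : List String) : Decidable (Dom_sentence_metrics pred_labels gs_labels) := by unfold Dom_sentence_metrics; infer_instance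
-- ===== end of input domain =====

-- B fuses A's two token-level passes into one and replaces A's pop(0)/insert(0)/set(range) entity
-- matching by a two-pointer merge with O(1) interval arithmetic (objective: alternative).


-- shared helper: transliteration of get_indices (identical in Source A and Source B)
def getIndices (labels : List String) : List (Int × Int) :=
  (labels.foldl (fun (s : List (Int × Int) × Int × Int × Bool) label =>
    let (indices, start, counter, in_entity) := s
    let counter := counter + 1
    if in_entity then
      if label == "O" then (indices ++ [(start, counter - 1)], start, counter, false)
      else if label == "B" then (indices ++ [(start, start)], counter, counter, true)
      else (indices, start, counter, true)
    else if label == "B" then (indices, counter, counter, true)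
    else (indices, start, counter, false)) ([], 0, 0, false)).1

-- ===== PORT A =====
def smA_conf_step (d : PySem.Dict String Int) (pg : String × String) : PySem.Dict String Int :=
  let (pred, gs) := pg
  if pred == "B" || pred == "I" then
    if gs == "B" || gs == "I" then d.modify "true_positive" 0 (· + 1)
    else if gs == "O" then d.modify "false_positive" 0 (· + 1)
    else d
  else if pred == "O" then
    if gs == "O" then d.modify "true_negative" 0 (· + 1)
    else if gs == "B" || gs == "I" then d.modify "false_negative" 0 (· + 1)
    else d
  else d

def smA_tok_step (d : PySem.Dict String (PySem.Dict String Int)) (pg : String × String) :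
    PySem.Dict String (PySem.Dict String Int) :=
  d.modify pg.2 PySem.Dict.empty (fun row => row.modify pg.1 0 (· + 1))

-- A's while loop: pops from the fronts, sometimes reinserting; returns (matrix, leftovers).
-- The fuel argument only makes the recursion structural; it is called with enough fuel to never run out.
def smA_entity_loop : Nat → List (Int × Int) → List (Int × Int) → PySem.Dict String Int →
    PySem.Dict String Int × List (Int × Int) × List (Int × Int)
  | 0, ps, qs, d => (d, ps, qs)
  | fuel + 1, ps, qs, d =>
    match ps, qs with
    | [], qs => (d, [], qs)
    | ps, [] => (d, ps, [])
    | p :: pt, g :: gt =>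
      let pred_set : PySem.Set Int := PySem.Set.ofList (PySem.List.pyRange p.1 (p.2 + 1))
      let gs_set : PySem.Set Int := PySem.Set.ofList (PySem.List.pyRange g.1 (g.2 + 1))
      if PySem.Set.inter pred_set gs_set ≠ [] then
        if PySem.Set.diff pred_set gs_set = [] then
          smA_entity_loop fuel pt gt (d.modify "true_positive" 0 (· + 1))
        else if !(PySem.Set.contains gs_set p.1) || !(PySem.Set.contains gs_set p.2) then
          smA_entity_loop fuel pt gt (d.modify "false_positive" 0 (· + 1))
        else
          smA_entity_loop fuel pt gt (d.modify "false_negative" 0 (· + 1))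
      else
        if p.1 > g.1 then
          smA_entity_loop fuel (p :: pt) gt (d.modify "false_negative" 0 (· + 1))
        else
          smA_entity_loop fuel pt (g :: gt) (d.modify "false_positive" 0 (· + 1))

def sentence_metrics (pred_labels : List String) (gs_labels : List String) :
    (List (String × Int)) × (List (String × List (String × Int))) × (List (String × Int)) :=
  let zipped := pred_labels.zip gs_labels
  let confusion_matrix := zipped.foldl smA_conf_step PySem.Dict.empty
  let token_matrix := zipped.foldl smA_tok_step PySem.Dict.empty
  let pred_indices := getIndices pred_labels
  let gs_indices := getIndices gs_labels
  let r := smA_entity_loop (pred_indices.length + gs_indices.length) pred_indices gs_indices PySem.Dict.empty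
  let entity_matrix := r.1
  let entity_matrix := entity_matrix.modify "false_positive" 0 (· + PySem.List.len r.2.1)
  let entity_matrix := entity_matrix.modify "false_negative" 0 (· + PySem.List.len r.2.2)
  -- reading confusion_matrix["true_negative"] on a defaultdict inserts the key if absent
  let confusion_matrix := confusion_matrix.modify "true_negative" 0 id
  let entity_matrix := entity_matrix.insert "true_negative" (confusion_matrix.getD "true_negative" 0)
  (confusion_matrix.items, (token_matrix.items.map (fun kv => (kv.1, kv.2.items))), entity_matrix.items)

-- ===== PORT B =====
def smB_pair_step (s : PySem.Dict String Int × PySem.Dict String (PySem.Dict String Int))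
    (pg : String × String) :
    PySem.Dict String Int × PySem.Dict String (PySem.Dict String Int) :=
  let (pred, gs) := pg
  let pred_ent := pred == "B" || pred == "I"
  let gs_ent := gs == "B" || gs == "I"
  let confusion_matrix :=
    if pred_ent then
      if gs_ent then s.1.modify "true_positive" 0 (· + 1)
      else if gs == "O" then s.1.modify "false_positive" 0 (· + 1)
      else s.1
    else if pred == "O" then
      if gs == "O" then s.1.modify "true_negative" 0 (· + 1)
      else if gs_ent then s.1.modify "false_negative" 0 (· + 1)
      else s.1
    else s.1
  let token_matrix := s.2.modify gs PySem.Dict.empty (fun row => row.modify pred 0 (· + 1))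
  (confusion_matrix, token_matrix)

-- B's two-pointer merge: index pointers i, j, O(1) interval arithmetic, no pops, no sets.
-- The fuel argument only makes the recursion structural; it is called with enough fuel to never run out.
def smB_entity_loop : Nat → List (Int × Int) → List (Int × Int) → Nat → Nat →
    PySem.Dict String Int → PySem.Dict String Int × Nat × Nat
  | 0, _, _, i, j, d => (d, i, j)
  | fuel + 1, ps, qs, i, j, d =>
    if h : i < ps.length ∧ j < qs.length then
      let p := ps[i]'h.1
      let g := qs[j]'h.2
      if max p.1 g.1 ≤ min p.2 g.2 then
        if g.1 ≤ p.1 ∧ p.2 ≤ g.2 then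
          smB_entity_loop fuel ps qs (i + 1) (j + 1) (d.modify "true_positive" 0 (· + 1))
        else
          smB_entity_loop fuel ps qs (i + 1) (j + 1) (d.modify "false_positive" 0 (· + 1))
      else if p.1 > g.1 then
        smB_entity_loop fuel ps qs i (j + 1) (d.modify "false_negative" 0 (· + 1))
      else
        smB_entity_loop fuel ps qs (i + 1) j (d.modify "false_positive" 0 (· + 1))
    else (d, i, j)

def sentence_metrics_alt (pred_labels : List String) (gs_labels : List String) :
    (List (String × Int)) × (List (String × List (String × Int))) × (List (String × Int)) :=
  let st := (pred_labels.zip gs_labels).foldl smB_pair_step (PySem.Dict.empty, PySem.Dict.empty)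
  let confusion_matrix := st.1
  let token_matrix := st.2
  let pred_indices := getIndices pred_labels
  let gs_indices := getIndices gs_labels
  let r := smB_entity_loop (pred_indices.length + gs_indices.length) pred_indices gs_indices 0 0 PySem.Dict.empty
  let entity_matrix := r.1
  let entity_matrix :=
    entity_matrix.modify "false_positive" 0 (· + (PySem.List.len pred_indices - (r.2.1 : Int)))
  let entity_matrix :=
    entity_matrix.modify "false_negative" 0 (· + (PySem.List.len gs_indices - (r.2.2 : Int)))
  -- reading confusion_matrix["true_negative"] on a defaultdict inserts the key if absent
  let confusion_matrix := confusion_matrix.modify "true_negative" 0 id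
  let entity_matrix := entity_matrix.insert "true_negative" (confusion_matrix.getD "true_negative" 0)
  (confusion_matrix.items, (token_matrix.items.map (fun kv => (kv.1, kv.2.items))), entity_matrix.items)

-- ===== PRECONDITION & SPEC =====
def Spec_sentence_metrics (pred_labels : List String) (gs_labels : List String) (out : (List (String × Int)) × (List (String × List (String × Int))) × (List (String × Int))) : Prop := out = sentence_metrics_alt pred_labels gs_labels
instance (pred_labels : List String) (gs_labels : List String) (out : (List (String × Int)) × (List (String × List (String × Int))) × (List (String × Int))) : Decidable (Spec_sentence_metrics pred_labels gs_labels out) := by unfold Spec_sentence_metrics; infer_instance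

-- ===== CLAIM (what is proved, stated in full; the proofs are below) =====
def Claim_equal_sentence_metrics : Prop := ∀ (pred_labels : List String) (gs_labels : List String), Dom_sentence_metrics pred_labels gs_labels → Spec_sentence_metrics pred_labels gs_labels (sentence_metrics pred_labels gs_labels)

-- ===== LEMMAS AND PROOFS =====

-- A's set-of-range tests are interval arithmetic
theorem inter_range_ne_nil_iff (a b c d : Int) :
    (PySem.Set.inter (PySem.Set.ofList (PySem.List.pyRange a (b + 1)))
        (PySem.Set.ofList (PySem.List.pyRange c (d + 1))) ≠ []) ↔ max a c ≤ min b d := by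
  constructor
  · intro h
    rcases List.exists_mem_of_ne_nil _ h with ⟨x, hx⟩
    rw [PySem.Set.mem_inter] at hx
    simp only [PySem.Set.mem_ofList, PySem.List.mem_pyRange_one] at hx
    omega
  · intro h hnil
    have : max a c ∈ PySem.Set.inter (PySem.Set.ofList (PySem.List.pyRange a (b + 1)))
        (PySem.Set.ofList (PySem.List.pyRange c (d + 1))) := by
      rw [PySem.Set.mem_inter]
      simp only [PySem.Set.mem_ofList, PySem.List.mem_pyRange_one]
      omega
    rw [hnil] at this
    exact absurd this (List.not_mem_nil)

theorem diff_range_eq_nil_iff (a b c d : Int) (hab : a ≤ b) :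
    (PySem.Set.diff (PySem.Set.ofList (PySem.List.pyRange a (b + 1)))
        (PySem.Set.ofList (PySem.List.pyRange c (d + 1))) = []) ↔ c ≤ a ∧ b ≤ d := by
  rw [List.eq_nil_iff_forall_not_mem]
  constructor
  · intro h
    have ha := h a
    have hb := h b
    rw [PySem.Set.mem_diff] at ha hb
    simp only [PySem.Set.mem_ofList, PySem.List.mem_pyRange_one] at ha hb
    omega
  · intro h x hx
    rw [PySem.Set.mem_diff] at hx
    simp only [PySem.Set.mem_ofList, PySem.List.mem_pyRange_one] at hx
    omega

theorem contains_range_iff (c d x : Int) :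
    PySem.Set.contains (PySem.Set.ofList (PySem.List.pyRange c (d + 1))) x = true ↔
      c ≤ x ∧ x ≤ d := by
  rw [PySem.Set.contains_iff]
  simp only [PySem.Set.mem_ofList, PySem.List.mem_pyRange_one]
  omega

-- the two entity loops walk the span lists in lock step
theorem entity_loops_agree (ps qs : List (Int × Int)) :
    ∀ (f i j : Nat) (d : PySem.Dict String Int),
      (ps.length - i) + (qs.length - j) ≤ f →
      smA_entity_loop f (ps.drop i) (qs.drop j) d =
        ((smB_entity_loop f ps qs i j d).1,
          ps.drop (smB_entity_loop f ps qs i j d).2.1,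
          qs.drop (smB_entity_loop f ps qs i j d).2.2) := by
  intro f
  induction f with
  | zero =>
    intro i j d hf
    rw [List.drop_eq_nil_of_le (by omega : ps.length ≤ i),
      List.drop_eq_nil_of_le (by omega : qs.length ≤ j)]
    rw [smA_entity_loop, smB_entity_loop]
    rw [List.drop_eq_nil_of_le (by omega : ps.length ≤ i),
      List.drop_eq_nil_of_le (by omega : qs.length ≤ j)]
  | succ f ih =>
    intro i j d hf
    by_cases h : i < ps.length ∧ j < qs.length
    · rw [List.drop_eq_getElem_cons h.1, List.drop_eq_getElem_cons h.2]
      rw [smA_entity_loop, smB_entity_loop, dif_pos h]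
      by_cases hov : max ps[i].1 qs[j].1 ≤ min ps[i].2 qs[j].2
      · have hab : ps[i].1 ≤ ps[i].2 := by omega
        rw [if_pos ((inter_range_ne_nil_iff ps[i].1 ps[i].2 qs[j].1 qs[j].2).mpr hov)]
        rw [if_pos hov]
        by_cases hsub : qs[j].1 ≤ ps[i].1 ∧ ps[i].2 ≤ qs[j].2
        · rw [if_pos ((diff_range_eq_nil_iff ps[i].1 ps[i].2 qs[j].1 qs[j].2 hab).mpr hsub)]
          rw [if_pos hsub]
          exact ih (i + 1) (j + 1) _ (by omega)
        · rw [if_neg (fun hd => hsub ((diff_range_eq_nil_iff ps[i].1 ps[i].2 qs[j].1 qs[j].2 hab).mp hd))]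
          have hcond : (!(PySem.Set.ofList (PySem.List.pyRange qs[j].1 (qs[j].2 + 1))).contains ps[i].1 ||
              !(PySem.Set.ofList (PySem.List.pyRange qs[j].1 (qs[j].2 + 1))).contains ps[i].2) = true := by
            by_contra hc
            simp only [Bool.not_eq_true, Bool.or_eq_false_iff, Bool.not_eq_false'] at hc
            exact absurd ⟨((contains_range_iff qs[j].1 qs[j].2 ps[i].1).mp hc.1).1,
              ((contains_range_iff qs[j].1 qs[j].2 ps[i].2).mp hc.2).2⟩ hsub
          rw [if_pos hcond, if_neg hsub]
          exact ih (i + 1) (j + 1) _ (by omega)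
      · rw [if_neg (fun hne => hov ((inter_range_ne_nil_iff ps[i].1 ps[i].2 qs[j].1 qs[j].2).mp hne))]
        rw [if_neg hov]
        by_cases hgt : ps[i].1 > qs[j].1
        · rw [if_pos hgt, if_pos hgt, ← List.drop_eq_getElem_cons h.1]
          exact ih i (j + 1) _ (by omega)
        · rw [if_neg hgt, if_neg hgt, ← List.drop_eq_getElem_cons h.2]
          exact ih (i + 1) j _ (by omega)
    · rw [smB_entity_loop, dif_neg h, smA_entity_loop.eq_def]
      rcases Decidable.not_and_iff_not_or_not.mp h with hi | hj
      · rw [List.drop_eq_nil_of_le (le_of_not_gt hi)]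
      · rw [List.drop_eq_nil_of_le (le_of_not_gt hj)]
        cases ps.drop i <;> rfl

theorem entity_loop_bounds (ps qs : List (Int × Int)) :
    ∀ (f i j : Nat) (d : PySem.Dict String Int), i ≤ ps.length → j ≤ qs.length →
      (smB_entity_loop f ps qs i j d).2.1 ≤ ps.length ∧
        (smB_entity_loop f ps qs i j d).2.2 ≤ qs.length := by
  intro f
  induction f with
  | zero => intro i j d hi hj; exact ⟨hi, hj⟩
  | succ f ih =>
    intro i j d hi hj
    rw [smB_entity_loop]
    by_cases h : i < ps.length ∧ j < qs.length
    · rw [dif_pos h]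
      by_cases hov : max ps[i].1 qs[j].1 ≤ min ps[i].2 qs[j].2
      · rw [if_pos hov]
        by_cases hsub : qs[j].1 ≤ ps[i].1 ∧ ps[i].2 ≤ qs[j].2
        · rw [if_pos hsub]; exact ih _ _ _ (by omega) (by omega)
        · rw [if_neg hsub]; exact ih _ _ _ (by omega) (by omega)
      · rw [if_neg hov]
        by_cases hgt : ps[i].1 > qs[j].1
        · rw [if_pos hgt]; exact ih _ _ _ hi (by omega)
        · rw [if_neg hgt]; exact ih _ _ _ (by omega) hj
    · rw [dif_neg h]; exact ⟨hi, hj⟩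

-- ===== VERDICT (by name: the statement is the Claim_ definition above) =====
theorem sentence_metrics_spec : Claim_equal_sentence_metrics := by
  intro pred_labels gs_labels _
  unfold Spec_sentence_metrics sentence_metrics sentence_metrics_alt
  have hstep : smB_pair_step = fun s pg => (smA_conf_step s.1 pg, smA_tok_step s.2 pg) := rfl
  have hloop := entity_loops_agree (getIndices pred_labels) (getIndices gs_labels)
    ((getIndices pred_labels).length + (getIndices gs_labels).length) 0 0 PySem.Dict.empty
    (by omega)
  have hb := entity_loop_bounds (getIndices pred_labels) (getIndices gs_labels)
    ((getIndices pred_labels).length + (getIndices gs_labels).length) 0 0 PySem.Dict.empty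
    (Nat.zero_le _) (Nat.zero_le _)
  simp only [List.drop_zero] at hloop
  have hc1 : (((getIndices pred_labels).length -
      (smB_entity_loop ((getIndices pred_labels).length + (getIndices gs_labels).length)
        (getIndices pred_labels) (getIndices gs_labels) 0 0 PySem.Dict.empty).2.1 : Nat) : Int) =
      ((getIndices pred_labels).length : Int) -
      ((smB_entity_loop ((getIndices pred_labels).length + (getIndices gs_labels).length)
        (getIndices pred_labels) (getIndices gs_labels) 0 0 PySem.Dict.empty).2.1 : Int) := by
    omega
  have hc2 : (((getIndices gs_labels).length -
      (smB_entity_loop ((getIndices pred_labels).length + (getIndices gs_labels).length)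
        (getIndices pred_labels) (getIndices gs_labels) 0 0 PySem.Dict.empty).2.2 : Nat) : Int) =
      ((getIndices gs_labels).length : Int) -
      ((smB_entity_loop ((getIndices pred_labels).length + (getIndices gs_labels).length)
        (getIndices pred_labels) (getIndices gs_labels) 0 0 PySem.Dict.empty).2.2 : Int) := by
    omega
  simp only [hstep, PySem.List.foldl_prod_mk, hloop, PySem.List.len_eq, List.length_drop, hc1, hc2]
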